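-- pv_equiv track=rewrite | github.com/Kaysaami/AI-API | services/resume_analyzer.py | _auto_detect_sections
-- ===== SOURCE A (Python) =====
-- from typing import Optional, Dict, List
--
-- def _auto_detect_sections(text: str) -> Dict[str, str]:
--     """
--     As a fallback, automatically detect section headers by scanning for short, all-uppercase lines.
--     """
--     sections = {}
--     current_header = "raw"
--     current_lines = []
--     for line in text.splitlines():
--         stripped = line.strip()
--         if stripped and stripped == stripped.upper() and len(stripped.split()) < 10:
--             if current_lines:
--                 sections[current_header] = "\n".join(current_lines).strip()
--             current_header = stripped.lower()
--             current_lines = []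
--         else:
--             current_lines.append(line)
--     if current_lines:
--         sections[current_header] = "\n".join(current_lines).strip()
--     return sections
-- ===== SOURCE B (Python) =====
-- from typing import Dict, List, Tuple
--
-- def _is_header(line: str) -> bool:
--     stripped = line.strip()
--     return bool(stripped) and stripped == stripped.upper() and len(stripped.split()) < 10
--
-- def _split_at_header(lines: List[str]) -> Tuple[List[str], List[str]]:
--     """Split lines into the longest non-header prefix and the rest."""
--     if not lines or _is_header(lines[0]):
--         return [], lines
--     body, rest = _split_at_header(lines[1:])
--     return [lines[0]] + body, rest
--
-- def _segments(key: str, lines: List[str]) -> List[Tuple[str, str]]: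
--     """Ordered (key, content) segments; a segment is emitted only if its body is non-empty."""
--     body, rest = _split_at_header(lines)
--     emitted = [] if not body else [(key, "\n".join(body).strip())]
--     if not rest:
--         return emitted
--     return emitted + _segments(rest[0].strip().lower(), rest[1:])
--
-- def _auto_detect_sections(text: str) -> Dict[str, str]:
--     sections = {}
--     for key, content in _segments("raw", text.splitlines()):
--         sections[key] = content
--     return sections
-- ===== Notes on version B (the rewrite author's own statement) =====
-- stated objective: alternative
-- what changed: Replaces A's single accumulator loop (current header + pending lines + flush-on-header) by a recursive segmentation: split off the longest non-header prefix, emit it as a segment when non-empty, recurse after the next header, then build the dict from the segment list in one final pass.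
import Mathlib
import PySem

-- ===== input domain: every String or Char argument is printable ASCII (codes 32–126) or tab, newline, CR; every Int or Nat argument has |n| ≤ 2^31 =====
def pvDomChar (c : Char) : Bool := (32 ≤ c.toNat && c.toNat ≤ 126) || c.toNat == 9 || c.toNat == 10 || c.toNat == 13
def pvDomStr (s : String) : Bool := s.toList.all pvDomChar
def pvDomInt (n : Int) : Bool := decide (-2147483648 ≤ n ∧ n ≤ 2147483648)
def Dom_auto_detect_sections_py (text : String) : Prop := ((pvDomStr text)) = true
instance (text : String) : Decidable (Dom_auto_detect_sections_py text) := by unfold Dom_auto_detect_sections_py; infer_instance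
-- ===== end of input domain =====

-- B replaces A's accumulator loop by a recursive segmentation (split off the longest
-- non-header prefix, emit non-empty segments, recurse past the next header), then builds
-- the dict from the segment list in one final pass; alternative decomposition, same cost.

-- ===== PORT A =====
def auto_detect_sections_py (text : String) : List (String × String) :=
  let fin := (PySem.Str.splitlines text).foldl
    (fun (st : PySem.Dict String String × String × List String) (line : String) =>
      match st with
      | (sections, current_header, current_lines) =>
        let stripped := PySem.Str.strip line
        if (stripped != "") && (stripped == PySem.Str.upper stripped)
            && decide ((PySem.Str.split₀ stripped).length < 10) then
          ((if current_lines.isEmpty then sections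
            else sections.insert current_header (PySem.Str.strip (PySem.Str.join "\n" current_lines))),
           PySem.Str.lower stripped, ([] : List String))
        else
          (sections, current_header, current_lines ++ [line]))
    (PySem.Dict.empty, "raw", ([] : List String))
  (if fin.2.2.isEmpty then fin.1
   else fin.1.insert fin.2.1 (PySem.Str.strip (PySem.Str.join "\n" fin.2.2))).items

-- ===== PORT B =====
def pvIsHeader (line : String) : Bool :=
  let stripped := PySem.Str.strip line
  (stripped != "") && (stripped == PySem.Str.upper stripped)
    && decide ((PySem.Str.split₀ stripped).length < 10)

def pvSplitAtHeader : List String → List String × List String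
  | [] => ([], [])
  | l :: ls =>
    if pvIsHeader l then ([], l :: ls)
    else
      let p := pvSplitAtHeader ls
      (l :: p.1, p.2)

theorem pvSplitAtHeader_snd_length (lines : List String) :
    (pvSplitAtHeader lines).2.length ≤ lines.length := by
  induction lines with
  | nil => simp [pvSplitAtHeader]
  | cons l ls ih =>
    simp only [pvSplitAtHeader]
    split
    · simp
    · simpa using Nat.le_succ_of_le ih

def pvSegments (key : String) (lines : List String) : List (String × String) :=
  let body := (pvSplitAtHeader lines).1
  let emitted := if body.isEmpty then ([] : List (String × String))
                 else [(key, PySem.Str.strip (PySem.Str.join "\n" body))]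
  match h : (pvSplitAtHeader lines).2 with
  | [] => emitted
  | hd :: tl => emitted ++ pvSegments (PySem.Str.lower (PySem.Str.strip hd)) tl
termination_by lines.length
decreasing_by
  have hle := pvSplitAtHeader_snd_length lines
  rw [h] at hle
  simp at hle
  omega

def auto_detect_sections_py_alt (text : String) : List (String × String) :=
  ((pvSegments "raw" (PySem.Str.splitlines text)).foldl
    (fun (sections : PySem.Dict String String) kv => sections.insert kv.1 kv.2)
    PySem.Dict.empty).items

-- ===== PRECONDITION & SPEC =====
def Spec_auto_detect_sections_py (text : String) (out : List (String × String)) : Prop := out = auto_detect_sections_py_alt text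
instance (text : String) (out : List (String × String)) : Decidable (Spec_auto_detect_sections_py text out) := by unfold Spec_auto_detect_sections_py; infer_instance

-- ===== CLAIM (what is proved, stated in full; the proofs are below) =====
def Claim_equal_auto_detect_sections_py : Prop := ∀ (text : String), Dom_auto_detect_sections_py text → Spec_auto_detect_sections_py text (auto_detect_sections_py text)

-- ===== LEMMAS AND PROOFS =====

/-- A's loop body, named for the proofs (definitionally the lambda in `auto_detect_sections_py`). -/
def pvStepA (st : PySem.Dict String String × String × List String) (line : String) :
    PySem.Dict String String × String × List String :=
  match st with
  | (sections, current_header, current_lines) =>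
    let stripped := PySem.Str.strip line
    if (stripped != "") && (stripped == PySem.Str.upper stripped)
        && decide ((PySem.Str.split₀ stripped).length < 10) then
      ((if current_lines.isEmpty then sections
        else sections.insert current_header (PySem.Str.strip (PySem.Str.join "\n" current_lines))),
       PySem.Str.lower stripped, ([] : List String))
    else
      (sections, current_header, current_lines ++ [line])

/-- A's final flush, named for the proofs. -/
def pvFlush (p : PySem.Dict String String × String × List String) : PySem.Dict String String :=
  if p.2.2.isEmpty then p.1
  else p.1.insert p.2.1 (PySem.Str.strip (PySem.Str.join "\n" p.2.2))

def pvEmit (key : String) (body : List String) : List (String × String) :=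
  if body.isEmpty then [] else [(key, PySem.Str.strip (PySem.Str.join "\n" body))]

def pvTailSegs : List String → List (String × String)
  | [] => []
  | hd :: tl => pvSegments (PySem.Str.lower (PySem.Str.strip hd)) tl

/-- Generalisation of B's segmentation that carries A's pending-lines accumulator. -/
def pvSegsCur (key : String) (cur : List String) : List String → List (String × String)
  | [] => pvEmit key cur
  | l :: ls =>
    if pvIsHeader l then
      pvEmit key cur ++ pvSegsCur (PySem.Str.lower (PySem.Str.strip l)) [] ls
    else
      pvSegsCur key (cur ++ [l]) ls

theorem pvSegments_eq (key : String) (lines : List String) :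
    pvSegments key lines =
      pvEmit key (pvSplitAtHeader lines).1 ++ pvTailSegs (pvSplitAtHeader lines).2 := by
  rw [pvSegments]
  cases h : (pvSplitAtHeader lines).2 with
  | nil => simp [pvEmit, pvTailSegs]
  | cons hd tl => simp [pvEmit, pvTailSegs]

theorem pvSegsCur_eq (lines : List String) :
    ∀ (key : String) (cur : List String),
      pvSegsCur key cur lines =
        pvEmit key (cur ++ (pvSplitAtHeader lines).1) ++ pvTailSegs (pvSplitAtHeader lines).2 := by
  induction lines with
  | nil => intro key cur; simp [pvSegsCur, pvSplitAtHeader, pvTailSegs]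
  | cons l ls ih =>
    intro key cur
    by_cases h : pvIsHeader l = true
    · rw [show pvSplitAtHeader (l :: ls) = ([], l :: ls) by simp [pvSplitAtHeader, h]]
      simp only [pvSegsCur, h, if_pos, pvTailSegs, List.append_nil]
      rw [ih (PySem.Str.lower (PySem.Str.strip l)) [], List.nil_append, ← pvSegments_eq]
    · rw [show pvSplitAtHeader (l :: ls) = (l :: (pvSplitAtHeader ls).1, (pvSplitAtHeader ls).2) by
        simp [pvSplitAtHeader, h]]
      simp only [pvSegsCur, h, if_neg, Bool.not_eq_true]
      rw [ih key (cur ++ [l])]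
      simp

theorem pvLoopA_eq (lines : List String) :
    ∀ (d : PySem.Dict String String) (key : String) (cur : List String),
      pvFlush (lines.foldl pvStepA (d, key, cur)) =
        (pvSegsCur key cur lines).foldl (fun s kv => s.insert kv.1 kv.2) d := by
  induction lines with
  | nil =>
    intro d key cur
    by_cases h : cur.isEmpty
    · simp [pvFlush, pvSegsCur, pvEmit, h]
    · simp [pvFlush, pvSegsCur, pvEmit, h]
  | cons l ls ih =>
    intro d key cur
    rw [List.foldl_cons]
    by_cases h : pvIsHeader l = true
    · have hc : ((PySem.Str.strip l != "") && (PySem.Str.strip l == PySem.Str.upper (PySem.Str.strip l))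
          && decide ((PySem.Str.split₀ (PySem.Str.strip l)).length < 10)) = true := by
        simpa [pvIsHeader] using h
      rw [show pvStepA (d, key, cur) l =
          ((if cur.isEmpty then d
            else d.insert key (PySem.Str.strip (PySem.Str.join "\n" cur))),
           PySem.Str.lower (PySem.Str.strip l), ([] : List String)) by
        simp [pvStepA, hc]]
      rw [ih]
      simp only [pvSegsCur, h, if_pos, List.foldl_append]
      by_cases hcur : cur.isEmpty
      · simp [pvEmit, hcur]
      · simp [pvEmit, hcur]
    · have hc : ((PySem.Str.strip l != "") && (PySem.Str.strip l == PySem.Str.upper (PySem.Str.strip l))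
          && decide ((PySem.Str.split₀ (PySem.Str.strip l)).length < 10)) = false := by
        simpa [pvIsHeader] using h
      rw [show pvStepA (d, key, cur) l = (d, key, cur ++ [l]) by simp [pvStepA, hc]]
      rw [ih]
      simp [pvSegsCur, h]

-- ===== VERDICT (by name: the statement is the Claim_ definition above) =====
theorem auto_detect_sections_py_spec : Claim_equal_auto_detect_sections_py := by
  intro text _
  unfold Spec_auto_detect_sections_py auto_detect_sections_py auto_detect_sections_py_alt
  have h1 := pvLoopA_eq (PySem.Str.splitlines text) PySem.Dict.empty "raw" []
  have h2 := pvSegsCur_eq (PySem.Str.splitlines text) "raw" []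
  rw [List.nil_append, ← pvSegments_eq] at h2
  rw [h2] at h1
  exact congrArg PySem.Dict.items h1
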